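-- pv_equiv track=rewrite | github.com/AndycptSher/RagTagBunch | src/whitespace_interpreter/main.py | extNum
-- ===== SOURCE A (Python) =====
-- def extNum(feed):
--     cut = feed.index("\n")
--     if cut == 0: raise Exception("Invalid expression")
--
--     elif cut == 1:
--         return feed[2:], 0
--
--     sign = {"\t": -1, " ": 1}[feed[0]]
--     number = [*feed[1:cut].replace("\t", "1").replace(" ", "0")]
--     twosComp = [2**x for x in range(len(number)-1,-1,-1)]
--     t = sign*sum(map(lambda a: int(a[0])*a[1], zip(number, twosComp)))
--     return feed[cut+1:], t
-- ===== SOURCE B (Python) =====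
-- BITS = {"\t": 1, " ": 0}
--
-- def extNum(feed):
--     cut = feed.index("\n")
--     if cut == 0:
--         raise Exception("Invalid expression")
--     rest = feed[cut + 1:]
--     if cut == 1:
--         return rest, 0
--     sign = -1 if feed[0] == "\t" else 1
--     total = 0
--     for c in feed[1:cut]:
--         total = total * 2 + BITS[c]
--     return rest, sign * total
-- ===== Notes on version B (the rewrite author's own statement) =====
-- stated objective: simpler
-- what changed: B accumulates the binary value in a single Horner left fold (total = total*2 + bit) with a direct tab/space bit table, instead of A's building a character list, a reversed powers-of-two table and a zip/map/sum; Pre_ excludes tokens containing characters other than tab/space, where A's replace/int pipeline happens to accept ASCII digits while B's bit lookup raises KeyError.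
-- outside the precondition, e.g. on extNum(' 1\n'): A returns ('', 1), B raises KeyError
import Mathlib
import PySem

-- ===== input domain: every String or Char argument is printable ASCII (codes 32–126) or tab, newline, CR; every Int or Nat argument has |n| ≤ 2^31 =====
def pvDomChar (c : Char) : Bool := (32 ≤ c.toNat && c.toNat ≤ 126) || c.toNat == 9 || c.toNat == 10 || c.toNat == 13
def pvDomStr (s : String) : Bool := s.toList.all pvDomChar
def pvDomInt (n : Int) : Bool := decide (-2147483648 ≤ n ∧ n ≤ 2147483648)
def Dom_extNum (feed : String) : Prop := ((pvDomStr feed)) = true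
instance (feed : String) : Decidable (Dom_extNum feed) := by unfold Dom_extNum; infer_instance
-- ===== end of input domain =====

-- B replaces A's powers-of-two table + zip + map/sum with a single Horner left fold over the
-- token's characters using a tab/space bit table (objective: simpler).


-- ===== PORT A =====
-- literal port of A: index of '\n', dict sign lookup, string replaces, powers-of-two table,
-- zip/map/sum.  Where the Python raises (no '\n': ValueError; cut = 0: Exception; feed[0] not in
-- the sign dict: KeyError; int() on a non-digit: ValueError) the port returns a default value;
-- all such inputs are excluded by Pre_extNum.
def extNum (feed : String) : String × Int :=
  let cs := feed.toList
  match PySem.List.index? cs '\n' with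
  | none => ("", 0)
  | some cut =>
    if cut = 0 then ("", 0)
    else if cut = 1 then (String.ofList (PySem.List.slice cs (some 2) none), 0)
    else
      match PySem.Dict.get? (PySem.Dict.ofList [('\t', (-1 : Int)), (' ', 1)]) ((PySem.List.pyGet? cs 0).getD ' ') with
      | none => ("", 0)
      | some sign =>
        let number := PySem.Chars.replace (PySem.Chars.replace (PySem.List.slice cs (some 1) (some (cut : Int))) ['\t'] ['1']) [' '] ['0']
        let twosComp := (PySem.List.pyRange ((number.length : Int) - 1) (-1) (-1)).map (fun x => (2 : Int) ^ x.toNat)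
        let t := sign * ((number.zip twosComp).map (fun a => ((PySem.Int.ofChars? [a.1]).getD 0) * a.2)).sum
        (String.ofList (PySem.List.slice cs (some ((cut : Int) + 1)) none), t)

-- ===== PORT B =====
-- Source B's BITS table; a missing key (KeyError in Python, excluded by Pre_) defaults to 0
def extBits : PySem.Dict Char Int := PySem.Dict.ofList [('\t', 1), (' ', 0)]

def extNum_alt (feed : String) : String × Int :=
  let cs := feed.toList
  match PySem.List.index? cs '\n' with
  | none => ("", 0)
  | some cut =>
    if cut = 0 then ("", 0)
    else
      let rest := String.ofList (PySem.List.slice cs (some ((cut : Int) + 1)) none)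
      if cut = 1 then (rest, 0)
      else
        let sign : Int := if (PySem.List.pyGet? cs 0).getD ' ' = '\t' then -1 else 1
        let total := (PySem.List.slice cs (some 1) (some (cut : Int))).foldl
          (fun t c => t * 2 + (PySem.Dict.get? extBits c).getD 0) 0
        (rest, sign * total)

-- ===== PRECONDITION & SPEC =====
-- Pre_ excludes the inputs on which the Python A raises: no '\n' in feed (ValueError), '\n' at
-- index 0 (Exception), or — when the token before '\n' has length ≥ 2 — feed[0] not a tab/space sign character
-- (KeyError) or a token character that is neither tab nor space (ValueError in int(), except that A's
-- replace/int pipeline accidentally accepts ASCII digit characters and returns a value there,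
-- while B's tab/space bit lookup raises KeyError: those digit-containing tokens are excluded too).
def Pre_extNum (feed : String) : Prop :=
  '\n' ∈ feed.toList ∧
  (let cut := (PySem.List.index? feed.toList '\n').getD 0
   cut ≠ 0 ∧
   (cut = 1 ∨
     ((feed.toList.take 1 = ['\t'] ∨ feed.toList.take 1 = [' ']) ∧
      ((feed.toList.take cut).drop 1).all (fun c => c == '\t' || c == ' '))))
instance (feed : String) : Decidable (Pre_extNum feed) := by unfold Pre_extNum; infer_instance

def pvWitness_extNum : String := "\t\t \t\nxy"

def Spec_extNum (feed : String) (out : String × Int) : Prop := out = extNum_alt feed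
instance (feed : String) (out : String × Int) : Decidable (Spec_extNum feed out) := by unfold Spec_extNum; infer_instance

-- ===== CLAIM (what is proved, stated in full; the proofs are below) =====
def Claim_equal_extNum : Prop := ∀ (feed : String), Dom_extNum feed → Pre_extNum feed → Spec_extNum feed (extNum feed)

-- ===== LEMMAS AND PROOFS =====

theorem replace_go_single (o n' : Char) :
    ∀ (l acc : List Char) (fuel : Nat), l.length ≤ fuel →
      PySem.Chars.replace.go [o] [n'] fuel l acc
        = acc.reverse ++ l.map (fun c => if c = o then n' else c) := by
  intro l
  induction l with
  | nil => intro acc fuel _; cases fuel <;> simp [PySem.Chars.replace.go]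
  | cons c t ih =>
    intro acc fuel hf
    cases fuel with
    | zero => simp at hf
    | succ f =>
      have hft : t.length ≤ f := by simp at hf; omega
      rw [show PySem.Chars.replace.go [o] [n'] (f+1) (c :: t) acc
          = if [o].isPrefixOf (c :: t) then
              PySem.Chars.replace.go [o] [n'] f (List.drop 1 (c :: t)) ([n'].reverse ++ acc)
            else PySem.Chars.replace.go [o] [n'] f t (c :: acc) from rfl]
      by_cases hc : c = o
      · rw [show [o].isPrefixOf (c :: t) = true by simp [List.isPrefixOf, hc]]
        simp only [if_true, List.drop_one, List.tail_cons, List.reverse_cons, List.reverse_nil,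
          List.nil_append]
        rw [show ([n'] ++ acc : List Char) = n' :: acc from rfl, ih (n' :: acc) f hft]
        simp [hc]
      · rw [show [o].isPrefixOf (c :: t) = false by simp [List.isPrefixOf]; exact fun h => hc h.symm]
        rw [if_neg (by simp)]
        rw [ih (c :: acc) f hft]
        simp [hc]

theorem replace_single (o n' : Char) (s : List Char) :
    PySem.Chars.replace s [o] [n'] = s.map (fun c => if c = o then n' else c) := by
  simpa [PySem.Chars.replace] using replace_go_single o n' s [] s.length le_rfl

theorem horner_eq_sum (g : Char → Int) :
    ∀ (ds : List Char) (acc : Int),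
      acc * 2 ^ ds.length
        + ((ds.zip ((PySem.List.pyRange ((ds.length : Int) - 1) (-1) (-1)).map
            (fun x => (2 : Int) ^ x.toNat))).map (fun a => g a.1 * a.2)).sum
        = ds.foldl (fun t c => t * 2 + g c) acc := by
  intro ds
  induction ds with
  | nil => intro acc; simp [PySem.List.pyRange_neg_one_eq_nil]
  | cons d t ih =>
    intro acc
    rw [List.length_cons]
    rw [show ((t.length + 1 : Nat) : Int) - 1 = (t.length : Int) by push_cast; ring]
    rw [PySem.List.pyRange_neg_one_cons (by omega)]
    simp only [List.map_cons, List.zip_cons_cons, List.sum_cons, List.foldl_cons]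
    rw [← ih (acc * 2 + g d)]
    simp only [Int.toNat_natCast, pow_succ]
    ring

theorem bit_agree (c : Char) (h : c = '\t' ∨ c = ' ') :
    (PySem.Int.ofChars? [if (if c = '\t' then '1' else c) = ' ' then '0'
        else (if c = '\t' then '1' else c)]).getD 0 = (PySem.Dict.get? extBits c).getD 0 := by
  rcases h with h | h <;> subst h <;> decide

theorem extNum_eq_alt : ∀ (feed : String), Pre_extNum feed → extNum feed = extNum_alt feed := by
  intro feed hpre
  unfold Pre_extNum at hpre
  obtain ⟨hmem, hpre2⟩ := hpre
  have hsome : (PySem.List.index? feed.toList '\n').isSome :=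
    (PySem.List.index?_isSome_iff _ _).mpr hmem
  obtain ⟨cut, hidx⟩ := Option.isSome_iff_exists.mp hsome
  rw [hidx] at hpre2
  simp only [Option.getD_some] at hpre2
  obtain ⟨hcut0, hrest⟩ := hpre2
  obtain ⟨hk, hget, hprev⟩ := PySem.List.getElem_of_index?_eq_some hidx
  by_cases hc1 : cut = 1
  · subst hc1
    rcases hcs : feed.toList with _ | ⟨a, l⟩
    · rw [hcs] at hk; simp at hk
    · rw [hcs] at hidx hk
      rw [PySem.List.index?_eq_idxOf?] at hidx
      simp [extNum, extNum_alt, hcs, hidx,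
        PySem.List.slice_from (a :: l) (by norm_num : (0:Int) ≤ 2)]
  · have hcut2 : 2 ≤ cut := by omega
    rcases hrest with h1 | ⟨hsign, hdig⟩
    · exact absurd h1 hc1
    obtain ⟨k, rfl⟩ : ∃ k, cut = k + 2 := ⟨cut - 2, by omega⟩
    rcases hcs : feed.toList with _ | ⟨h, t1⟩
    · rw [hcs] at hk; simp at hk
    rcases hct : t1 with _ | ⟨d0, t2⟩
    · rw [hcs, hct] at hk; simp at hk
    rw [hct] at hcs
    rw [hcs] at hidx hk hsign hdig
    -- head character
    have hh : h = '\t' ∨ h = ' ' := by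
      rcases hsign with hs | hs <;> simp at hs <;> [left; right] <;> exact hs
    have hdig' : ∀ c ∈ d0 :: t2.take k, c = '\t' ∨ c = ' ' := by
      intro c hc
      have := List.all_eq_true.mp hdig c (by simpa [List.take_succ_cons] using hc)
      simp only [Bool.or_eq_true, beq_iff_eq] at this
      tauto
    simp only [extNum, extNum_alt, hcs]
    rw [hidx]
    simp only [Nat.succ_ne_zero, if_false]
    rw [show PySem.List.slice (h :: d0 :: t2) (some 1) (some ((k+2 : Nat) : Int))
        = d0 :: t2.take k by
      rw [PySem.List.slice_toNat _ (by norm_num) (by positivity)]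
      simp only [Int.toNat_natCast, Int.toNat_one]
      rw [show k + 2 - 1 = k + 1 from by omega]
      simp [List.take_succ_cons]]
    rw [replace_single, replace_single, List.map_map]
    simp only [Function.comp_def]
    rw [show (PySem.List.pyGet? (h :: d0 :: t2) 0).getD ' ' = h from by
      have h0 : (0:Int) ≤ (t2.length : Int) + 1 := by omega
      simp [PySem.List.pyGet?, PySem.List.pyIdx?, h0]]
    have key : ((((d0 :: t2.take k).map (fun c => if (if c = '\t' then '1' else c) = ' '
          then '0' else (if c = '\t' then '1' else c))).zip
          ((PySem.List.pyRange ((((d0 :: t2.take k).map (fun c => if (if c = '\t' then '1' else c) = ' '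
            then '0' else (if c = '\t' then '1' else c))).length : Int) - 1) (-1) (-1)).map
            (fun x => (2 : Int) ^ x.toNat))).map
          (fun a => ((PySem.Int.ofChars? [a.1]).getD 0) * a.2)).sum
        = (d0 :: t2.take k).foldl (fun t c => t * 2 + (PySem.Dict.get? extBits c).getD 0) 0 := by
      have h1 := horner_eq_sum (fun c => (PySem.Int.ofChars? [c]).getD 0)
        ((d0 :: t2.take k).map (fun c => if (if c = '\t' then '1' else c) = ' '
          then '0' else (if c = '\t' then '1' else c))) 0
      simp only [zero_mul, zero_add, List.foldl_map] at h1
      rw [h1]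
      exact PySem.List.foldl_congr_mem _ _ _ 0 (fun acc c hc => by
        rw [bit_agree c (hdig' c hc)])
    rcases hh with rfl | rfl
    · rw [show PySem.Dict.get? (PySem.Dict.ofList [('\t', (-1 : Int)), (' ', 1)]) '\t'
          = some (-1) from rfl]
      refine congrArg₂ Prod.mk rfl ?_
      rw [key, if_pos rfl]
    · rw [show PySem.Dict.get? (PySem.Dict.ofList [('\t', (-1 : Int)), (' ', 1)]) ' '
          = some 1 from rfl]
      refine congrArg₂ Prod.mk rfl ?_
      rw [key, if_neg (by decide)]

-- ===== VERDICT (by name: the statement is the Claim_ definition above) =====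
theorem extNum_spec : Claim_equal_extNum := by
  unfold Claim_equal_extNum
  intro feed _ hpre
  unfold Spec_extNum
  exact extNum_eq_alt feed hpre
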